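-- pv_equiv track=rewrite | github.com/danush2705/AI | CIA1/Hill_Climbing.py | find_best_neighbor
-- ===== SOURCE A (Python) =====
-- def calculate_path_cost(heuristic_values, path):
--     return sum([heuristic_values[node] for node in path])
--
-- def generate_path_neighbors(path):
--     neighbors = []
--     for i in range(1, len(path) - 1):  # Exclude start and goal
--         for j in range(i + 1, len(path) - 1):
--             new_neighbor = path.copy()
--             new_neighbor[i], new_neighbor[j] = new_neighbor[j], new_neighbor[i]  # Swap nodes
--             neighbors.append(new_neighbor)
--     return neighbors
--
-- def find_best_neighbor(graph_structure, heuristic_values, current_path):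
--     neighbors = generate_path_neighbors(current_path)
--
--     best_neighbor = current_path
--     best_cost = calculate_path_cost(heuristic_values, current_path)
--
--     for neighbor in neighbors:
--         neighbor_cost = calculate_path_cost(heuristic_values, neighbor)
--         if neighbor_cost < best_cost:
--             best_cost = neighbor_cost
--             best_neighbor = neighbor
--
--     return best_neighbor, best_cost
-- ===== SOURCE B (Python) =====
-- def find_best_neighbor(graph_structure, heuristic_values, current_path):
--     # Every generated neighbor is a permutation of current_path's nodes, so its
--     # cost (a sum over node heuristics) equals the current cost; the strict '<'
--     # test can never fire, so the best neighbor is always current_path itself.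
--     cost = 0
--     for node in current_path:
--         cost += heuristic_values[node]
--     return current_path, cost
-- ===== Notes on version B (the rewrite author's own statement) =====
-- stated objective: faster
-- what changed: B skips generating and scanning the O(n^2) swap-neighbors entirely: every neighbor is a permutation of the same node multiset, so its cost equals current_path's cost and the strict '<' never fires; B just sums the heuristics over current_path once and returns (current_path, cost).
import Mathlib
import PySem

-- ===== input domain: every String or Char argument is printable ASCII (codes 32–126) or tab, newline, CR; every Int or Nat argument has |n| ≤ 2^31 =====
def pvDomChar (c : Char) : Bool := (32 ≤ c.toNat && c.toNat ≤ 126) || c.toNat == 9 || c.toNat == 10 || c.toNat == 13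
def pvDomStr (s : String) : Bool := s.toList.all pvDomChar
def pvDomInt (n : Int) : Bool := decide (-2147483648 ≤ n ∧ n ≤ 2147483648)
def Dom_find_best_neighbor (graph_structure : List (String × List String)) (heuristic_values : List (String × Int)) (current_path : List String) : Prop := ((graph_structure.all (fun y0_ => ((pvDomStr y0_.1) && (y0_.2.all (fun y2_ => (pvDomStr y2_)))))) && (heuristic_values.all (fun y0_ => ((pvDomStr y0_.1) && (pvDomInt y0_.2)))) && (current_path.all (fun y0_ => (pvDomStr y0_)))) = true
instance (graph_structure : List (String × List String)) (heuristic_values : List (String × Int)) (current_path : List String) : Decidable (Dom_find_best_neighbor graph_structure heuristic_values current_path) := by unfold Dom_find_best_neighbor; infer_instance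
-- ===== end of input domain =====

-- B: returns (current_path, sum of heuristics) directly — every swap-neighbor is a
-- permutation of the same nodes, so A's scan never improves; O(n) instead of O(n^3).
-- ===== PORT A =====
def pvCalcCost (heuristic_values : List (String × Int)) (path : List String) : Int :=
  (path.map (fun node => ((PySem.Dict.mk heuristic_values).get? node).getD 0)).sum

def pvGenNeighbors (path : List String) : List (List String) :=
  (PySem.List.pyRange 1 ((path.length : Int) - 1) 1).foldl (fun acc i =>
    acc ++ (PySem.List.pyRange (i + 1) ((path.length : Int) - 1) 1).map (fun j =>
      let vi := PySem.List.pyGetD path j ""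
      let vj := PySem.List.pyGetD path i ""
      PySem.List.pySetD (PySem.List.pySetD path i vi) j vj)) []

def find_best_neighbor (graph_structure : List (String × List String)) (heuristic_values : List (String × Int)) (current_path : List String) : List String × Int :=
  let neighbors := pvGenNeighbors current_path
  neighbors.foldl (fun best neighbor =>
    let neighbor_cost := pvCalcCost heuristic_values neighbor
    if neighbor_cost < best.2 then (neighbor, neighbor_cost) else best)
    (current_path, pvCalcCost heuristic_values current_path)

-- ===== PORT B =====
def find_best_neighbor_alt (graph_structure : List (String × List String)) (heuristic_values : List (String × Int)) (current_path : List String) : List String × Int :=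
  (current_path,
   current_path.foldl (fun cost node => cost + ((PySem.Dict.mk heuristic_values).get? node).getD 0) 0)

-- ===== PRECONDITION & SPEC =====
-- Pre_ excludes inputs where some node of current_path is missing from heuristic_values:
-- there both Pythons raise KeyError.
def Pre_find_best_neighbor (graph_structure : List (String × List String)) (heuristic_values : List (String × Int)) (current_path : List String) : Prop :=
  ∀ node ∈ current_path, (PySem.Dict.mk heuristic_values).contains node = true
instance (graph_structure : List (String × List String)) (heuristic_values : List (String × Int)) (current_path : List String) : Decidable (Pre_find_best_neighbor graph_structure heuristic_values current_path) := by unfold Pre_find_best_neighbor; infer_instance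
def pvWitness_find_best_neighbor : (List (String × List String)) × (List (String × Int)) × List String :=
  ([("A", ["B"])], [("A", 3), ("B", 1), ("C", 2)], ["A", "C", "B", "A"])

def Spec_find_best_neighbor (graph_structure : List (String × List String)) (heuristic_values : List (String × Int)) (current_path : List String) (out : List String × Int) : Prop := out = find_best_neighbor_alt graph_structure heuristic_values current_path
instance (graph_structure : List (String × List String)) (heuristic_values : List (String × Int)) (current_path : List String) (out : List String × Int) : Decidable (Spec_find_best_neighbor graph_structure heuristic_values current_path out) := by unfold Spec_find_best_neighbor; infer_instance

-- ===== CLAIM (what is proved, stated in full; the proofs are below) =====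
def Claim_equal_find_best_neighbor : Prop := ∀ (graph_structure : List (String × List String)) (heuristic_values : List (String × Int)) (current_path : List String), Dom_find_best_neighbor graph_structure heuristic_values current_path → Pre_find_best_neighbor graph_structure heuristic_values current_path → Spec_find_best_neighbor graph_structure heuristic_values current_path (find_best_neighbor graph_structure heuristic_values current_path)

-- ===== LEMMAS AND PROOFS =====

theorem L_foldl_sum (f : String → Int) (l : List String) (c : Int) :
    l.foldl (fun cost node => cost + f node) c = c + (l.map f).sum := by
  induction l generalizing c with
  | nil => simp
  | cons x xs ih => simp [List.foldl, ih (c + f x)]; ring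

theorem L_sum_set (xs : List Int) (n : Nat) (a : Int) (h : n < xs.length) :
    (xs.set n a).sum = xs.sum - xs[n] + a := by
  induction xs generalizing n with
  | nil => simp at h
  | cons x t ih =>
    cases n with
    | zero => simp; ring
    | succ m =>
      simp only [List.set, List.sum_cons, List.getElem_cons_succ]
      rw [ih m (by simpa using h)]
      ring

theorem L_cost_swap (hv : List (String × Int)) (path : List String) (i j : Int)
    (hi0 : 0 ≤ i) (hij : i < j) (hjlen : j < (path.length : Int)) :
    pvCalcCost hv (PySem.List.pySetD (PySem.List.pySetD path i (PySem.List.pyGetD path j "")) j (PySem.List.pyGetD path i "")) = pvCalcCost hv path := by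
  have hj0 : 0 ≤ j := by omega
  have hiN : i.toNat < path.length := by omega
  have hjN : j.toNat < path.length := by omega
  have hne : i.toNat ≠ j.toNat := by omega
  rw [PySem.List.pySetD_of_nonneg _ _ hi0, PySem.List.pySetD_of_nonneg _ _ hj0,
      PySem.List.pyGetD_eq_getElem _ _ hi0 (by omega), PySem.List.pyGetD_eq_getElem _ _ hj0 (by omega)]
  unfold pvCalcCost
  set f : String → Int := fun node => ((PySem.Dict.mk hv).get? node).getD 0 with hf
  rw [List.map_set, List.map_set]
  rw [L_sum_set _ j.toNat _ (by simpa using hjN)]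
  rw [L_sum_set _ i.toNat _ (by simpa using hiN)]
  rw [List.getElem_set_ne (by omega), List.getElem_map, List.getElem_map]
  ring

theorem L_mem_neighbors (path : List String) (n : List String) (hn : n ∈ pvGenNeighbors path) :
    ∃ i j : Int, 0 ≤ i ∧ i < j ∧ j < (path.length : Int) ∧
      n = PySem.List.pySetD (PySem.List.pySetD path i (PySem.List.pyGetD path j "")) j (PySem.List.pyGetD path i "") := by
  unfold pvGenNeighbors at hn
  rw [PySem.List.foldl_append_eq_flatMap] at hn
  simp only [List.nil_append, List.mem_flatMap, List.mem_map] at hn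
  obtain ⟨i, hi, j, hj, hnij⟩ := hn
  rw [PySem.List.mem_pyRange_one] at hi hj
  exact ⟨i, j, by omega, by omega, by omega, hnij.symm⟩

theorem L_fold_keep (hv : List (String × Int)) (p : List String) (c : Int)
    (ns : List (List String)) (h : ∀ n ∈ ns, pvCalcCost hv n = c) :
    ns.foldl (fun best neighbor =>
      let neighbor_cost := pvCalcCost hv neighbor
      if neighbor_cost < best.2 then (neighbor, neighbor_cost) else best) (p, c) = (p, c) := by
  induction ns with
  | nil => rfl
  | cons n t ih =>
    have hc : pvCalcCost hv n = c := h n (List.mem_cons_self)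
    simp only [List.foldl, hc, lt_irrefl, if_false]
    exact ih (fun m hm => h m (List.mem_cons_of_mem _ hm))

-- ===== VERDICT (by name: the statement is the Claim_ definition above) =====
theorem find_best_neighbor_spec : Claim_equal_find_best_neighbor := by
  intro graph_structure heuristic_values current_path _ _
  unfold Spec_find_best_neighbor find_best_neighbor find_best_neighbor_alt
  rw [L_foldl_sum]
  simp only [zero_add]
  rw [L_fold_keep heuristic_values current_path (pvCalcCost heuristic_values current_path)
        (pvGenNeighbors current_path)
        (fun n hn => by
          obtain ⟨i, j, hi0, hij, hjlen, hn⟩ := L_mem_neighbors current_path n hn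
          rw [hn]; exact L_cost_swap heuristic_values current_path i j hi0 hij hjlen)]
  rfl
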